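-- pv_equiv track=rewrite | github.com/nikuframedia-svg/Moldit- | apps/backend/src/domain/scheduler/overflow_router.py | _compute_advanced_edd
-- ===== SOURCE A (Python) =====
-- def _compute_advanced_edd(edd: int, adv_days: int, workdays: list[bool]) -> int:
--     """Count adv_days workdays backward from edd. Returns -1 if insufficient."""
--     count = 0
--     day = edd
--     while count < adv_days and day > 0:
--         day -= 1
--         if day < len(workdays) and workdays[day]:
--             count += 1
--     return day if count == adv_days else -1
-- ===== SOURCE B (Python) =====
-- def _compute_advanced_edd(edd: int, adv_days: int, workdays: list[bool]) -> int:
--     """Count adv_days workdays backward from edd. Returns -1 if insufficient."""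
--     if adv_days <= 0:
--         return edd if adv_days == 0 else -1
--     hi = min(edd, len(workdays))
--     positions = [p for p in range(max(hi, 0)) if workdays[p]]
--     if len(positions) >= adv_days:
--         return positions[len(positions) - adv_days]
--     return -1
-- ===== Notes on version B (the rewrite author's own statement) =====
-- stated objective: faster
-- what changed: Replaced A's early-terminating backward day-by-day while loop (which steps through every day from edd down, even days past the workdays list) with a single forward pass that collects the workday indices below min(edd, len(workdays)) and returns the answer by position arithmetic (positions[len(positions)-adv_days]).
import Mathlib
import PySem

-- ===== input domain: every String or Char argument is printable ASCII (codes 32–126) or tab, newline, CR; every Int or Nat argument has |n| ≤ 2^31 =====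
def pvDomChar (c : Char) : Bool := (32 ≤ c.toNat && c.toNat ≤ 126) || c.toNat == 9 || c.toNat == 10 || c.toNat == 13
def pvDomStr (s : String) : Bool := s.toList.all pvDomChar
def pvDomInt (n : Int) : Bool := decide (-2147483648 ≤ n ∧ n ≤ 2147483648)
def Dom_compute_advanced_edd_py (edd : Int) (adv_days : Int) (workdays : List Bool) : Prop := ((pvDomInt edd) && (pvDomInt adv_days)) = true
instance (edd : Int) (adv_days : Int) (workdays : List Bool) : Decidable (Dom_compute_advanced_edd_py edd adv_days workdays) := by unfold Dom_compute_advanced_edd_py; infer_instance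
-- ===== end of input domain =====

-- B replaces A's early-terminating backward day-by-day scan (O(edd) steps) by one forward
-- pass collecting workday indices below edd plus position arithmetic (O(len(workdays)) steps).

-- ===== PORT A =====
-- the while-loop of A: state (count, day), decremented day each iteration
def pvLoopA (adv_days : Int) (workdays : List Bool) (count : Int) (day : Int) : Int :=
  if _h : count < adv_days ∧ 0 < day then
    let day' := day - 1
    if day' < (workdays.length : Int) ∧ workdays.getD day'.toNat false = true then
      pvLoopA adv_days workdays (count + 1) day'
    else
      pvLoopA adv_days workdays count day'
  else
    if count = adv_days then day else -1
termination_by day.toNat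
decreasing_by all_goals omega

def compute_advanced_edd_py (edd : Int) (adv_days : Int) (workdays : List Bool) : Int :=
  pvLoopA adv_days workdays 0 edd

-- ===== PORT B =====
def compute_advanced_edd_py_alt (edd : Int) (adv_days : Int) (workdays : List Bool) : Int :=
  if adv_days ≤ 0 then (if adv_days = 0 then edd else -1)
  else
    let hi : Int := min edd (workdays.length : Int)
    let positions : List Nat :=
      (List.range (max hi 0).toNat).filter (fun p => workdays.getD p false)
    if adv_days ≤ (positions.length : Int) then
      ((positions.getD (positions.length - adv_days.toNat) 0 : Nat) : Int)
    else -1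

-- ===== PRECONDITION & SPEC =====
def Spec_compute_advanced_edd_py (edd : Int) (adv_days : Int) (workdays : List Bool) (out : Int) : Prop := out = compute_advanced_edd_py_alt edd adv_days workdays
instance (edd : Int) (adv_days : Int) (workdays : List Bool) (out : Int) : Decidable (Spec_compute_advanced_edd_py edd adv_days workdays out) := by unfold Spec_compute_advanced_edd_py; infer_instance

-- ===== CLAIM (what is proved, stated in full; the proofs are below) =====
def Claim_equal_compute_advanced_edd_py : Prop := ∀ (edd : Int) (adv_days : Int) (workdays : List Bool), Dom_compute_advanced_edd_py edd adv_days workdays → Spec_compute_advanced_edd_py edd adv_days workdays (compute_advanced_edd_py edd adv_days workdays)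

-- ===== LEMMAS AND PROOFS =====

-- workday indices strictly below `day` (clamped to [0, length))
def pvPs (wd : List Bool) (day : Int) : List Nat :=
  (List.range (max (min day (wd.length : Int)) 0).toNat).filter (fun p => wd.getD p false)

-- the closed form of the loop result, parametrised by remaining count
def pvF (adv : Int) (wd : List Bool) (count : Int) (day : Int) : Int :=
  if adv - count ≤ 0 then (if adv - count = 0 then day else -1)
  else if adv - count ≤ ((pvPs wd day).length : Int) then
    (((pvPs wd day).getD ((pvPs wd day).length - (adv - count).toNat) 0 : Nat) : Int)
  else -1

lemma pvPs_succ (wd : List Bool) (day : Int) (hday : 0 < day) :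
    pvPs wd day = pvPs wd (day - 1) ++
      (if day - 1 < (wd.length : Int) ∧ wd.getD (day - 1).toNat false = true
        then [(day - 1).toNat] else []) := by
  unfold pvPs
  by_cases hle : day ≤ (wd.length : Int)
  · have h1 : (max (min day (wd.length : Int)) 0).toNat = (day - 1).toNat + 1 := by omega
    have h2 : (max (min (day - 1) (wd.length : Int)) 0).toNat = (day - 1).toNat := by omega
    have hlt : day - 1 < (wd.length : Int) := by omega
    rw [h1, h2, List.range_succ, List.filter_append]
    simp only [List.filter_cons, List.filter_nil]
    by_cases hb : wd.getD (day - 1).toNat false = true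
    · simp [hlt]
    · simp [hlt]
  · have h1 : (max (min day (wd.length : Int)) 0).toNat = wd.length := by omega
    have h2 : (max (min (day - 1) (wd.length : Int)) 0).toNat = wd.length := by omega
    have hlt : ¬ (day - 1 < (wd.length : Int)) := by omega
    rw [h1, h2]
    simp [hlt]

lemma pvLoopA_eq_pvF (wd : List Bool) (adv : Int) :
    ∀ (n : Nat) (day count : Int), day.toNat = n →
      pvLoopA adv wd count day = pvF adv wd count day := by
  intro n
  induction n with
  | zero =>
    intro day count hn
    have hday : ¬ 0 < day := by omega
    rw [pvLoopA, pvF]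
    have hps : pvPs wd day = [] := by
      unfold pvPs
      have : (max (min day (wd.length : Int)) 0).toNat = 0 := by omega
      rw [this]; simp
    rw [dif_neg (by simp [hday])]
    by_cases hc : count = adv
    · simp [hc]
    · have h1 : ¬ (adv - count = 0) := by omega
      by_cases h2 : adv - count ≤ 0
      · simp [hc, h1, h2]
      · simp [hc, h2, hps]
  | succ n ih =>
    intro day count hn
    have hday : 0 < day := by omega
    have hn' : (day - 1).toNat = n := by omega
    rw [pvLoopA]
    by_cases hc : count < adv
    · rw [dif_pos ⟨hc, hday⟩]
      by_cases hit : day - 1 < (wd.length : Int) ∧ wd.getD (day - 1).toNat false = true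
      · rw [if_pos hit, ih (day - 1) (count + 1) hn']
        have hps : pvPs wd day = pvPs wd (day - 1) ++ [(day - 1).toNat] := by
          rw [pvPs_succ wd day hday, if_pos hit]
        unfold pvF
        rw [hps]
        have hlen : ((pvPs wd (day - 1) ++ [(day - 1).toNat]).length : Int)
            = ((pvPs wd (day - 1)).length : Int) + 1 := by simp
        by_cases h1 : adv - (count + 1) ≤ 0
        · -- remaining after this hit is 0; since count < adv, adv - count = 1
          have hr2 : adv - (count + 1) = 0 := by omega
          have hnot : ¬ (adv - count ≤ 0) := by omega
          rw [if_pos h1, if_pos hr2, if_neg hnot]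
          have hle : adv - count ≤ ((pvPs wd (day - 1) ++ [(day - 1).toNat]).length : Int) := by
            rw [hlen]; omega
          rw [if_pos hle]
          have hidx : (pvPs wd (day - 1) ++ [(day - 1).toNat]).length - (adv - count).toNat
              = (pvPs wd (day - 1)).length := by
            simp only [List.length_append, List.length_cons, List.length_nil]; omega
          rw [hidx, List.getD_append_right _ _ _ _ (le_refl _)]
          simp
          omega
        · have hnot0 : ¬ (adv - count ≤ 0) := by omega
          rw [if_neg h1, if_neg hnot0]
          have hcond : (adv - (count + 1) ≤ ((pvPs wd (day - 1)).length : Int)) ↔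
              (adv - count ≤ ((pvPs wd (day - 1) ++ [(day - 1).toNat]).length : Int)) := by
            rw [hlen]; omega
          by_cases h2 : adv - (count + 1) ≤ ((pvPs wd (day - 1)).length : Int)
          · rw [if_pos h2, if_pos (hcond.mp h2)]
            have hidx : (pvPs wd (day - 1) ++ [(day - 1).toNat]).length - (adv - count).toNat
                = (pvPs wd (day - 1)).length - (adv - (count + 1)).toNat := by
              simp only [List.length_append, List.length_cons, List.length_nil]
              omega
            rw [hidx]
            have hlt : (pvPs wd (day - 1)).length - (adv - (count + 1)).toNat
                < (pvPs wd (day - 1)).length := by omega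
            rw [List.getD_append _ _ _ _ hlt]
          · rw [if_neg h2, if_neg (fun h => h2 (hcond.mpr h))]
      · rw [if_neg hit, ih (day - 1) count hn']
        have hps : pvPs wd day = pvPs wd (day - 1) := by
          rw [pvPs_succ wd day hday, if_neg hit, List.append_nil]
        unfold pvF
        rw [hps]
        have h1 : ¬ (adv - count ≤ 0) := by omega
        rw [if_neg h1, if_neg h1]
    · -- count ≥ adv: loop exits
      rw [dif_neg (by simp [hc])]
      unfold pvF
      by_cases he : count = adv
      · simp [he]
      · have h0 : adv - count ≤ 0 := by omega
        have hne : adv - count ≠ 0 := by omega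
        simp [he, h0, hne]

lemma pvF_zero_eq_alt (edd adv : Int) (wd : List Bool) :
    pvF adv wd 0 edd = compute_advanced_edd_py_alt edd adv wd := by
  unfold pvF compute_advanced_edd_py_alt pvPs
  simp only [sub_zero]

-- ===== VERDICT (by name: the statement is the Claim_ definition above) =====
theorem compute_advanced_edd_py_spec : Claim_equal_compute_advanced_edd_py := by
  intro edd adv_days workdays _
  unfold Spec_compute_advanced_edd_py compute_advanced_edd_py
  rw [pvLoopA_eq_pvF workdays adv_days edd.toNat edd 0 rfl, pvF_zero_eq_alt]
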